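-- pv_equiv track=rewrite | github.com/drsapaev/final | backend/app/services/service_mapping.py | get_queue_group_for_service
-- ===== SOURCE A (Python) =====
-- from typing import Any, Dict, Optional, TYPE_CHECKING
--
-- QUEUE_GROUPS = {
--     "cardiology": {
--         "display_name": "Кардиология",
--         "display_name_uz": "Kardiologiya",
--         "service_codes": ["K01", "K11"],  # Консультация + ЭхоКГ
--         "service_prefixes": ["K"],  # Все K-коды кроме K10
--         "exclude_codes": ["K10"],  # K10 = ЭКГ - отдельная вкладка
--         "queue_tag": "cardiology",
--         "tab_key": "cardio",
--     },
--     "ecg": {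
--         "display_name": "ЭКГ",
--         "display_name_uz": "EKG",
--         "service_codes": ["K10"],  # K10 is the standard code for ЭКГ
--         "service_prefixes": [],
--         "exclude_codes": [],
--         "queue_tag": "echokg",
--         "tab_key": "echokg",
--     },
--     "dermatology": {
--         "display_name": "Дерматология",
--         "display_name_uz": "Dermatologiya",
--         "service_codes": ["D01"],  # Только консультация
--         "service_prefixes": ["D"],
--         "exclude_codes": ["D_PROC"],  # D_PROC = процедуры
--         "queue_tag": "dermatology",
--         "tab_key": "derma",
--     },
--     "dental": {
--         "display_name": "Стоматология",
--         "display_name_uz": "Stomatologiya",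
--         "service_codes": ["S01", "S10"],  # Консультация + рентген зубов
--         "service_prefixes": ["S"],
--         "exclude_codes": [],
--         "queue_tag": "stomatology",
--         "tab_key": "dental",
--     },
--     "laboratory": {
--         "display_name": "Лаборатория",
--         "display_name_uz": "Laboratoriya",
--         "service_codes": ["L00", "L01", "L02", "L11", "L20", "L23", "L65"],
--         "service_prefixes": ["L"],
--         "exclude_codes": [],
--         "queue_tag": "laboratory",
--         "tab_key": "lab",
--     },
--     "procedures": {
--         "display_name": "Процедуры",
--         "display_name_uz": "Protseduralar",
--         "service_codes": ["P01", "P02", "P05", "C01", "C03", "C05", "C12", "D_PROC01", "D_PROC02"],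
--         "service_prefixes": ["P", "C", "D_PROC"],
--         "exclude_codes": [],
--         "queue_tag": "procedures",
--         "tab_key": "procedures",
--     },
-- }
--
-- def get_queue_group_for_service(code: str) -> Optional[str]:
--     """
--     SSOT: Определяет к какой группе очереди относится услуга.
--
--     Args:
--         code: Код услуги (K01, D01, L02, D_PROC02 и т.д.)
--
--     Returns:
--         Ключ группы очереди (cardiology, dermatology, laboratory и т.д.) или None
--
--     Examples:
--         >>> get_queue_group_for_service("K01")
--         'cardiology'
--         >>> get_queue_group_for_service("K10")
--         'ecg'
--         >>> get_queue_group_for_service("D_PROC02")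
--         'procedures'
--     """
--     if not code:
--         return None
--
--     code_upper = code.upper()
--
--     for group_key, group_data in QUEUE_GROUPS.items():
--         # Проверяем точное совпадение с service_codes
--         if code_upper in [c.upper() for c in group_data.get("service_codes", [])]:
--             return group_key
--
--         # Проверяем по префиксам (но исключаем exclude_codes)
--         exclude_codes = [c.upper() for c in group_data.get("exclude_codes", [])]
--         if code_upper in exclude_codes:
--             continue
--
--         for prefix in group_data.get("service_prefixes", []):
--             if code_upper.startswith(prefix.upper()):
--                 # Проверяем что код не в списке исключений
--                 is_excluded = any(code_upper.startswith(exc.upper()) for exc in exclude_codes)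
--                 if not is_excluded:
--                     return group_key
--
--     return None
-- ===== SOURCE B (Python) =====
-- # Simpler: one precomputed exact-code -> group dict plus a flat ordered prefix table,
-- # replacing A's per-group nested scans over the big config dict.
--
-- _TABLE = [
--     ("cardiology", ["K01", "K11"], ["K"], ["K10"]),
--     ("ecg", ["K10"], [], []),
--     ("dermatology", ["D01"], ["D"], ["D_PROC"]),
--     ("dental", ["S01", "S10"], ["S"], []),
--     ("laboratory", ["L00", "L01", "L02", "L11", "L20", "L23", "L65"], ["L"], []),
--     ("procedures", ["P01", "P02", "P05", "C01", "C03", "C05", "C12", "D_PROC01", "D_PROC02"],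
--      ["P", "C", "D_PROC"], []),
-- ]
--
-- _EXACT = {}
-- _PREFIX_RULES = []
-- for _group, _codes, _prefixes, _excludes in _TABLE:
--     for _c in _codes:
--         _EXACT[_c] = _group
--     for _p in _prefixes:
--         _PREFIX_RULES.append((_p, _group, tuple(_excludes)))
--
--
-- def get_queue_group_for_service(code: str):
--     if not code:
--         return None
--     cu = code.upper()
--     group = _EXACT.get(cu)
--     if group is not None:
--         return group
--     for prefix, grp, excludes in _PREFIX_RULES:
--         if cu.startswith(prefix) and not any(cu.startswith(e) for e in excludes):
--             return grp
--     return None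
-- ===== Notes on version B (the rewrite author's own statement) =====
-- stated objective: simpler
-- what changed: Replaces A's per-group walk over the big config dict (uppercasing each code list and nested exclude scans on every call) with one precomputed exact-code->group dict consulted first, then a single flat ordered (prefix, group, excludes) rule list.
import Mathlib
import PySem

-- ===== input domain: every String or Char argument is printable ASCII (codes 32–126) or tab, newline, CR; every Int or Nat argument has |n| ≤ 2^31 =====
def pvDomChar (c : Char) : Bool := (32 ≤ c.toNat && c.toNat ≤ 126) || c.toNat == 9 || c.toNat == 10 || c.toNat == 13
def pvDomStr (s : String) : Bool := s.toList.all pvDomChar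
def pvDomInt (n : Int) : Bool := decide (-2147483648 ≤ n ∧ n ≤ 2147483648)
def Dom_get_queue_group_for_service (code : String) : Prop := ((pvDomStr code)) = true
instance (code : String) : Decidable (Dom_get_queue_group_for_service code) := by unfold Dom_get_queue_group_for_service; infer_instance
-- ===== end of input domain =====

-- B replaces A's per-group scans over the config dict by an exact-code dict plus a flat prefix-rule list (simpler lookup structure).

-- ===== PORT A =====
-- QUEUE_GROUPS, keeping only the fields A reads: (group_key, service_codes, service_prefixes, exclude_codes), insertion order
def pvGroupsA : List (String × List String × List String × List String) :=
  [("cardiology", ["K01", "K11"], ["K"], ["K10"]),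
   ("ecg", ["K10"], [], []),
   ("dermatology", ["D01"], ["D"], ["D_PROC"]),
   ("dental", ["S01", "S10"], ["S"], []),
   ("laboratory", ["L00", "L01", "L02", "L11", "L20", "L23", "L65"], ["L"], []),
   ("procedures", ["P01", "P02", "P05", "C01", "C03", "C05", "C12", "D_PROC01", "D_PROC02"],
    ["P", "C", "D_PROC"], [])]

-- inner 'for prefix in service_prefixes' loop: true = 'return group_key'
def pvPrefLoopA (cu : String) (excl : List String) : List String → Bool
  | [] => false
  | p :: rest =>
    if PySem.Str.startswith cu (PySem.Str.upper p) then
      if excl.any (fun e => PySem.Str.startswith cu (PySem.Str.upper e)) then pvPrefLoopA cu excl rest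
      else true
    else pvPrefLoopA cu excl rest

-- outer 'for group_key, group_data in QUEUE_GROUPS.items()' loop
def pvGroupLoopA (cu : String) : List (String × List String × List String × List String) → Option String
  | [] => none
  | (gk, scs, sps, excs) :: rest =>
    if cu ∈ scs.map PySem.Str.upper then some gk
    else
      let excl := excs.map PySem.Str.upper
      if cu ∈ excl then pvGroupLoopA cu rest
      else if pvPrefLoopA cu excl sps then some gk
      else pvGroupLoopA cu rest

def get_queue_group_for_service (code : String) : Option String :=
  if code = "" then none
  else pvGroupLoopA (PySem.Str.upper code) pvGroupsA

-- ===== PORT B =====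
-- _EXACT: every service code mapped to its group (built once, in table order)
def pvExactB : PySem.Dict String String :=
  PySem.Dict.ofList
    [("K01", "cardiology"), ("K11", "cardiology"),
     ("K10", "ecg"),
     ("D01", "dermatology"),
     ("S01", "dental"), ("S10", "dental"),
     ("L00", "laboratory"), ("L01", "laboratory"), ("L02", "laboratory"),
     ("L11", "laboratory"), ("L20", "laboratory"), ("L23", "laboratory"), ("L65", "laboratory"),
     ("P01", "procedures"), ("P02", "procedures"), ("P05", "procedures"),
     ("C01", "procedures"), ("C03", "procedures"), ("C05", "procedures"), ("C12", "procedures"),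
     ("D_PROC01", "procedures"), ("D_PROC02", "procedures")]

-- _PREFIX_RULES: flat ordered (prefix, group, exclude prefixes)
def pvRulesB : List (String × String × List String) :=
  [("K", "cardiology", ["K10"]),
   ("D", "dermatology", ["D_PROC"]),
   ("S", "dental", []),
   ("L", "laboratory", []),
   ("P", "procedures", []),
   ("C", "procedures", []),
   ("D_PROC", "procedures", [])]

def pvRuleLoopB (cu : String) : List (String × String × List String) → Option String
  | [] => none
  | (p, g, excl) :: rest =>
    if PySem.Str.startswith cu p && !(excl.any (fun e => PySem.Str.startswith cu e)) then some g
    else pvRuleLoopB cu rest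

def get_queue_group_for_service_alt (code : String) : Option String :=
  if code = "" then none
  else
    let cu := PySem.Str.upper code
    match pvExactB.get? cu with
    | some g => some g
    | none => pvRuleLoopB cu pvRulesB

-- ===== PRECONDITION & SPEC =====
def Spec_get_queue_group_for_service (code : String) (out : Option String) : Prop := out = get_queue_group_for_service_alt code
instance (code : String) (out : Option String) : Decidable (Spec_get_queue_group_for_service code out) := by unfold Spec_get_queue_group_for_service; infer_instance

-- ===== CLAIM (what is proved, stated in full; the proofs are below) =====
def Claim_equal_get_queue_group_for_service : Prop := ∀ (code : String), Dom_get_queue_group_for_service code → Spec_get_queue_group_for_service code (get_queue_group_for_service code)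

-- ===== LEMMAS AND PROOFS =====

lemma pvCoreEq (cu : String) :
    pvGroupLoopA cu pvGroupsA =
      (match pvExactB.get? cu with
       | some g => some g
       | none => pvRuleLoopB cu pvRulesB) := by
  by_cases h1 : cu = "K01"; · subst h1; decide
  by_cases h2 : cu = "K11"; · subst h2; decide
  by_cases h3 : cu = "K10"; · subst h3; decide
  by_cases h4 : cu = "D01"; · subst h4; decide
  by_cases h5 : cu = "S01"; · subst h5; decide
  by_cases h6 : cu = "S10"; · subst h6; decide
  by_cases h7 : cu = "L00"; · subst h7; decide
  by_cases h8 : cu = "L01"; · subst h8; decide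
  by_cases h9 : cu = "L02"; · subst h9; decide
  by_cases h10 : cu = "L11"; · subst h10; decide
  by_cases h11 : cu = "L20"; · subst h11; decide
  by_cases h12 : cu = "L23"; · subst h12; decide
  by_cases h13 : cu = "L65"; · subst h13; decide
  by_cases h14 : cu = "P01"; · subst h14; decide
  by_cases h15 : cu = "P02"; · subst h15; decide
  by_cases h16 : cu = "P05"; · subst h16; decide
  by_cases h17 : cu = "C01"; · subst h17; decide
  by_cases h18 : cu = "C03"; · subst h18; decide
  by_cases h19 : cu = "C05"; · subst h19; decide
  by_cases h20 : cu = "C12"; · subst h20; decide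
  by_cases h21 : cu = "D_PROC01"; · subst h21; decide
  by_cases h22 : cu = "D_PROC02"; · subst h22; decide
  by_cases h23 : cu = "D_PROC"; · subst h23; decide
  have uK : PySem.Str.upper "K" = "K" := by decide
  have uK10 : PySem.Str.upper "K10" = "K10" := by decide
  have uD : PySem.Str.upper "D" = "D" := by decide
  have uDP : PySem.Str.upper "D_PROC" = "D_PROC" := by decide
  have uS : PySem.Str.upper "S" = "S" := by decide
  have uL : PySem.Str.upper "L" = "L" := by decide
  have uP : PySem.Str.upper "P" = "P" := by decide
  have uC : PySem.Str.upper "C" = "C" := by decide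
  have mcard : List.map PySem.Str.upper ["K01", "K11"] = ["K01", "K11"] := by decide
  have mecg : List.map PySem.Str.upper ["K10"] = ["K10"] := by decide
  have mderm : List.map PySem.Str.upper ["D01"] = ["D01"] := by decide
  have mdent : List.map PySem.Str.upper ["S01", "S10"] = ["S01", "S10"] := by decide
  have mlab : List.map PySem.Str.upper ["L00", "L01", "L02", "L11", "L20", "L23", "L65"] = ["L00", "L01", "L02", "L11", "L20", "L23", "L65"] := by decide
  have mproc : List.map PySem.Str.upper ["P01", "P02", "P05", "C01", "C03", "C05", "C12", "D_PROC01", "D_PROC02"] = ["P01", "P02", "P05", "C01", "C03", "C05", "C12", "D_PROC01", "D_PROC02"] := by decide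
  simp only [pvGroupsA, pvGroupLoopA, pvPrefLoopA, pvRulesB, pvRuleLoopB,
    mcard, mecg, mderm, mdent, mlab, mproc, uK, uK10, uD, uDP, uS, uL, uP, uC,
    List.map_nil, List.any_cons, List.any_nil, List.mem_cons,
    List.not_mem_nil]
  simp only [h1, h2, h3, h4, h5, h6, h7, h8, h9, h10, h11, h12, h13, h14, h15, h16, h17, h18,
    h19, h20, h21, h22, or_self, if_false]
  have mexK : List.map PySem.Str.upper ["K10"] = ["K10"] := by decide
  have mexD : List.map PySem.Str.upper ["D_PROC"] = ["D_PROC"] := by decide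
  have hkeys : PySem.Dict.keys pvExactB = ["K01","K11","K10","D01","S01","S10","L00","L01","L02","L11","L20","L23","L65","P01","P02","P05","C01","C03","C05","C12","D_PROC01","D_PROC02"] := by decide
  have hget : pvExactB.get? cu = none := by
    rw [PySem.Dict.get?_eq_none_iff_not_mem_keys]
    simp [hkeys, h1, h2, h3, h4, h5, h6, h7, h8, h9, h10, h11, h12, h13, h14, h15, h16, h17,
      h18, h19, h20, h21, h22]
  rw [hget]
  simp only [mexD, List.mem_singleton, h23, if_false]
  have uDPc : PySem.Chars.upper ['D','_','P','R','O','C'] = ['D','_','P','R','O','C'] := by decide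
  simp
  simp only [uDPc]
  generalize PySem.Chars.startswith cu.toList ['K', '1', '0'] = bK10
  generalize PySem.Chars.startswith cu.toList ['K'] = bK
  generalize PySem.Chars.startswith cu.toList ['D', '_', 'P', 'R', 'O', 'C'] = bDP
  generalize PySem.Chars.startswith cu.toList ['D'] = bD
  generalize PySem.Chars.startswith cu.toList ['S'] = bS
  generalize PySem.Chars.startswith cu.toList ['L'] = bL
  generalize PySem.Chars.startswith cu.toList ['P'] = bP
  generalize PySem.Chars.startswith cu.toList ['C'] = bC
  revert bK10 bK bDP bD bS bL bP bC
  decide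

-- ===== VERDICT (by name: the statement is the Claim_ definition above) =====
theorem get_queue_group_for_service_spec : Claim_equal_get_queue_group_for_service := by
  intro code _
  unfold Spec_get_queue_group_for_service get_queue_group_for_service get_queue_group_for_service_alt
  by_cases h : code = ""
  · simp [h]
  · simp only [h, if_false]
    exact pvCoreEq (PySem.Str.upper code)
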